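-- pv_equiv track=rewrite | github.com/patwadeepak/data-structures-and-algorithms | codeforces/contests-participated/Codeforces Round 1044 (Div. 2)/D-practice.py | get_damage
-- ===== SOURCE A (Python) =====
-- def get_damage(a, n, i):
--     d = a[i]
--
--     if i+1 < n:
--         if a[i+1] <= i+1:
--             d += a[i+1]
--             if i+2 < n:
--                 d += get_damage(a[i+2:], len(a[i+2:]), 0)
--         else:
--             d += i+1
--     return d
-- ===== SOURCE B (Python) =====
-- def get_damage(a, n, i):
--     # Iterative single pass tracking an offset into the original array (no slicing).
--     d = a[i]
--     if i + 1 < n: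
--         if a[i+1] <= i+1:
--             d += a[i+1]
--             if i + 2 < n:
--                 L = len(a)
--                 j = i + 2
--                 while True:
--                     d += a[j]
--                     if j + 1 >= L:
--                         break
--                     if a[j+1] > 1:
--                         d += 1
--                         break
--                     d += a[j+1]
--                     if j + 2 >= L:
--                         break
--                     j += 2
--         else:
--             d += i + 1
--     return d
-- ===== Notes on version B (the rewrite author's own statement) =====
-- stated objective: alternative
-- what changed: A recurses on a fresh slice a[i+2:] at every chain step; B walks the original array once with an integer offset and an accumulator, no slicing and no recursion.
-- outside the precondition, e.g. on get_damage([-2, -3, 4, 1, -3, 4], 7, -3): A returns 2, B returns -2; on get_damage([1, 1, 1], 5, 1): A raises IndexError, B raises IndexError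
import Mathlib
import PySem

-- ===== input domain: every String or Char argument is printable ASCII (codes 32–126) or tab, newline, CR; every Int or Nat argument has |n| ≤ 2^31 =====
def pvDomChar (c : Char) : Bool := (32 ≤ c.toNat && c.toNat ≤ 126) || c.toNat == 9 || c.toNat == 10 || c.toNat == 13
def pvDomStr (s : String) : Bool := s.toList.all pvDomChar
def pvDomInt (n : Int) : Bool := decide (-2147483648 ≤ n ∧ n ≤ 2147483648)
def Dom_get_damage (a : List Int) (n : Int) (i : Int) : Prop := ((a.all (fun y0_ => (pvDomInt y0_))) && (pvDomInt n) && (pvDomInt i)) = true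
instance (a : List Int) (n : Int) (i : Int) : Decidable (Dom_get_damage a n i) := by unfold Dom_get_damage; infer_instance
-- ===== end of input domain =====

-- B replaces A's recursion on slices by one iterative pass over the original array (return value only; neither mutates).

-- ===== PORT A =====
-- literal port of A: recursion on the slice a[i+2:], indexing via pyGet? (getD 0 only where Python would raise; Pre_ excludes those inputs)
def get_damage (a : List Int) (n : Int) (i : Int) : Int :=
  let d := (PySem.List.pyGet? a i).getD 0
  if i + 1 < n then
    if (PySem.List.pyGet? a (i + 1)).getD 0 ≤ i + 1 then
      let d := d + (PySem.List.pyGet? a (i + 1)).getD 0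
      if i + 2 < n then
        d + get_damage (PySem.List.slice a (some (i + 2)) none)
              ((PySem.List.slice a (some (i + 2)) none).length : Int) 0
      else d
    else d + (i + 1)
  else d
termination_by (a.length, (if i < 0 then 1 else 0 : Nat), n.toNat)
decreasing_by
  rename_i _h1 h2 h3
  rw [PySem.List.slice_some_none]
  have hdl : (List.drop (PySem.List.clampIdx a.length (i + 2)) a).length
      = a.length - PySem.List.clampIdx a.length (i + 2) := List.length_drop
  refine Prod.lex_iff.mpr ?_
  by_cases hneg : i + 2 < 0
  · -- negative start: the taken branch forces pyGet? a (i+1) = some _, hence -len a ≤ i+1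
    have hin : PySem.Raise.InRange a.length (i + 1) := by
      by_contra hno
      rw [(PySem.List.pyGet?_eq_none_iff a (i + 1)).mpr hno] at h2
      simp only [Option.getD_none] at h2
      omega
    obtain ⟨hlo, _⟩ := hin
    have hc : PySem.List.clampIdx a.length (i + 2) = ((a.length : Int) + (i + 2)).toNat := by
      simp only [PySem.List.clampIdx, hneg, if_true]
      have : ¬ (a.length : Int) + (i + 2) < 0 := by omega
      simp [this]
    left
    omega
  · -- start i+2 ≥ 0
    have hc : PySem.List.clampIdx a.length (i + 2) = min (i + 2).toNat a.length := by
      simp [PySem.List.clampIdx, hneg]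
    by_cases hL : a.length = 0
    · -- empty list: pyGet? a (i+1) = none, so 0 ≤ i+1
      have hget : PySem.List.pyGet? a (i + 1) = none := by
        rw [PySem.List.pyGet?_eq_none_iff]
        simp [PySem.Raise.InRange, hL]
      rw [hget] at h2
      simp only [Option.getD_none] at h2
      right
      constructor
      · omega
      · refine Prod.lex_iff.mpr ?_
        by_cases hi0 : i < 0
        · left; simp [hi0]
        · right
          exact ⟨by simp [hi0], by dsimp only; omega⟩
    · by_cases hz : i + 2 = 0
      · -- start 0: slice is the whole list; i = -2 < 0, second component drops 1 → 0
        right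
        constructor
        · omega
        · refine Prod.lex_iff.mpr ?_
          left
          simp only [if_neg (show ¬ (0:Int) < 0 by omega), if_pos (show i < 0 by omega)]
          omega
      · -- start ≥ 1 on a nonempty list: slice strictly shorter
        left
        omega

-- ===== PORT B =====
-- the while-loop of Source B: offset j into the original array, accumulator d
def chainLoop (a : List Int) (L : Int) (j : Int) (d : Int) : Int :=
  let d := d + (PySem.List.pyGet? a j).getD 0
  if L ≤ j + 1 then d
  else if 1 < (PySem.List.pyGet? a (j + 1)).getD 0 then d + 1
  else
    let d := d + (PySem.List.pyGet? a (j + 1)).getD 0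
    if L ≤ j + 2 then d
    else chainLoop a L (j + 2) d
termination_by (L - j).toNat
decreasing_by omega

def get_damage_alt (a : List Int) (n : Int) (i : Int) : Int :=
  let d := (PySem.List.pyGet? a i).getD 0
  if i + 1 < n then
    if (PySem.List.pyGet? a (i + 1)).getD 0 ≤ i + 1 then
      let d := d + (PySem.List.pyGet? a (i + 1)).getD 0
      if i + 2 < n then chainLoop a (a.length : Int) (i + 2) d
      else d
    else d + (i + 1)
  else d

-- ===== PRECONDITION & SPEC =====
-- Pre_ restricts to the natural domain: index i ≥ -2 (with a long enough for a[i], a[i+1]) and n ≤ len(a)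
-- (or n ≤ i+1, where n never lets the branch read past a[i]).  For i ≤ -3 A's chained value mixes
-- negative-index wraparound with slicing in an accidental way, and for n > len(a) with i+1 < n A raises
-- IndexError on value-dependent inputs; both lie outside the intended use (i = 0 on a full array).
def Pre_get_damage (a : List Int) (n : Int) (i : Int) : Prop :=
  -2 ≤ i ∧ i < (a.length : Int) ∧ -i ≤ (a.length : Int) ∧ (n ≤ (a.length : Int) ∨ n ≤ i + 1)
instance (a : List Int) (n : Int) (i : Int) : Decidable (Pre_get_damage a n i) := by unfold Pre_get_damage; infer_instance

def pvWitness_get_damage : List Int × Int × Int := ([3, 1, 2, 1, 5], 5, 0)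

def Spec_get_damage (a : List Int) (n : Int) (i : Int) (out : Int) : Prop := out = get_damage_alt a n i
instance (a : List Int) (n : Int) (i : Int) (out : Int) : Decidable (Spec_get_damage a n i out) := by unfold Spec_get_damage; infer_instance

-- ===== CLAIM (what is proved, stated in full; the proofs are below) =====
def Claim_equal_get_damage : Prop := ∀ (a : List Int) (n : Int) (i : Int), Dom_get_damage a n i → Pre_get_damage a n i → Spec_get_damage a n i (get_damage a n i)

-- ===== LEMMAS AND PROOFS =====

-- A's chain, read on the suffix a.drop k, equals B's loop started at offset k
theorem chainLoop_eq_get_damage_drop (a : List Int) :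
    ∀ (r k : Nat) (d : Int), a.length - k ≤ r → k < a.length →
      chainLoop a (a.length : Int) (k : Int) d
        = d + get_damage (a.drop k) ((a.drop k).length : Int) 0 := by
  intro r
  induction r with
  | zero => intro k d hr hk; omega
  | succ r ih =>
    intro k d _ hk
    have hget0 : PySem.List.pyGet? (a.drop k) 0 = some a[k] := by
      rw [show (0 : Int) = ((0 : Nat) : Int) from rfl, PySem.List.pyGet?_natCast]
      simp [hk]
    have hgetk : PySem.List.pyGet? a (k : Int) = some a[k] := by
      rw [PySem.List.pyGet?_natCast]
      simp [hk]
    rw [chainLoop, get_damage]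
    simp only [hget0, hgetk, Option.getD_some, List.length_drop]
    by_cases h1 : (k : Int) + 1 < (a.length : Int)
    · rw [if_neg (show ¬ (a.length : Int) ≤ (k : Int) + 1 by omega),
        if_pos (show (0 : Int) + 1 < ((a.length - k : Nat) : Int) by omega)]
      have hk1 : k + 1 < a.length := by omega
      have hget1 : PySem.List.pyGet? (a.drop k) (0 + 1) = some a[k + 1] := by
        rw [show (0 : Int) + 1 = ((1 : Nat) : Int) from rfl, PySem.List.pyGet?_natCast]
        simp [hk1]
      have hgetk1 : PySem.List.pyGet? a ((k : Int) + 1) = some a[k + 1] := by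
        rw [show (k : Int) + 1 = ((k + 1 : Nat) : Int) by push_cast; ring, PySem.List.pyGet?_natCast]
        simp [hk1]
      rw [hget1, hgetk1]
      simp only [Option.getD_some]
      by_cases h2 : a[k + 1] ≤ 1
      · rw [if_neg (show ¬ 1 < a[k + 1] by omega), if_pos (show a[k + 1] ≤ 0 + 1 by omega)]
        by_cases h3 : (k : Int) + 2 < (a.length : Int)
        · rw [if_neg (show ¬ (a.length : Int) ≤ (k : Int) + 2 by omega),
            if_pos (show (0 : Int) + 2 < ((a.length - k : Nat) : Int) by omega)]
          have hk2 : k + 2 < a.length := by omega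
          have hslice : PySem.List.slice (a.drop k) (some (0 + 2)) none = a.drop (k + 2) := by
            rw [PySem.List.slice_from _ (by norm_num : (0:Int) ≤ 0 + 2),
              show ((0:Int) + 2).toNat = 2 from rfl, List.drop_drop]
          rw [hslice, show (k : Int) + 2 = ((k + 2 : Nat) : Int) by push_cast; ring,
            ih (k + 2) _ (by omega) hk2]
          ring
        · rw [if_pos (show (a.length : Int) ≤ (k : Int) + 2 by omega),
            if_neg (show ¬ (0 : Int) + 2 < ((a.length - k : Nat) : Int) by omega)]
          ring
      · rw [if_pos (show 1 < a[k + 1] by omega), if_neg (show ¬ a[k + 1] ≤ 0 + 1 by omega)]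
        ring
    · rw [if_pos (show (a.length : Int) ≤ (k : Int) + 1 by omega),
        if_neg (show ¬ (0 : Int) + 1 < ((a.length - k : Nat) : Int) by omega)]

-- Int-index form of the previous lemma
theorem chainLoop_eq_int (a : List Int) (j : Int) (d : Int) (h0 : 0 ≤ j) (hj : j < (a.length : Int)) :
    chainLoop a (a.length : Int) j d
      = d + get_damage (a.drop j.toNat) ((a.drop j.toNat).length : Int) 0 := by
  have h := chainLoop_eq_get_damage_drop a (a.length - j.toNat) j.toNat d (by omega) (by omega)
  rwa [Int.toNat_of_nonneg h0] at h

-- ===== VERDICT (by name: the statement is the Claim_ definition above) =====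
theorem get_damage_spec : Claim_equal_get_damage := by
  intro a n i _ hpre
  obtain ⟨hi2, hiL, hniL, hnL⟩ := hpre
  unfold Spec_get_damage
  rw [get_damage, get_damage_alt]
  by_cases h1 : i + 1 < n
  · simp only [h1, if_true]
    by_cases h2 : (PySem.List.pyGet? a (i + 1)).getD 0 ≤ i + 1
    · simp only [h2, if_true]
      by_cases h3 : i + 2 < n
      · simp only [h3, if_true]
        have hnL' : n ≤ (a.length : Int) := by omega
        rw [PySem.List.slice_from a (show (0:Int) ≤ i + 2 by omega),
          chainLoop_eq_int a (i + 2) _ (by omega) (by omega)]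
      · simp [h3]
    · simp [h2]
  · simp [h1]
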